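-- pv_equiv track=rewrite | github.com/kevinyang372/algorithm-studies | CtCl/Trees and Graphs/paths_with_sum.py | possible_paths
-- ===== SOURCE A (Python) =====
-- def possible_paths(path, sums, target):
--
--     res = 0
--
--     for k, v in path:
--         if sums[v] == target:
--             res += 1
--         for k1, v1 in path[:k]:
--             if sums[v] - sums[v1] == target:
--                 res += 1
--
--     return res
-- ===== SOURCE B (Python) =====
-- def possible_paths(path, sums, target):
--     n = len(path)
--     cnt = {}
--     pos = 0
--     res = 0
--     for k, v in sorted(path, key=lambda kv: kv[0]):
--         while pos < k and pos < n:
--             s = sums[path[pos][1]]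
--             cnt[s] = cnt.get(s, 0) + 1
--             pos += 1
--         s = sums[v]
--         if s == target:
--             res += 1
--         res += cnt.get(s - target, 0)
--     return res
-- ===== Notes on version B (the rewrite author's own statement) =====
-- stated objective: faster
-- what changed: A rescans the slice path[:k] for every element (nested loops); B sorts the elements by k once and does a single sweep that maintains a dict counting prefix-sum values seen so far, answering each element with one hash lookup; Pre_ excludes inputs where A raises IndexError (a node index out of range of sums) and inputs with a negative prefix length k, outside the natural domain, where A's path[:k] wraps from the end.
-- outside the precondition, e.g. on possible_paths([(-1, 0), (0, 0)], [0], 0): A returns 3, B returns 2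
import Mathlib
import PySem

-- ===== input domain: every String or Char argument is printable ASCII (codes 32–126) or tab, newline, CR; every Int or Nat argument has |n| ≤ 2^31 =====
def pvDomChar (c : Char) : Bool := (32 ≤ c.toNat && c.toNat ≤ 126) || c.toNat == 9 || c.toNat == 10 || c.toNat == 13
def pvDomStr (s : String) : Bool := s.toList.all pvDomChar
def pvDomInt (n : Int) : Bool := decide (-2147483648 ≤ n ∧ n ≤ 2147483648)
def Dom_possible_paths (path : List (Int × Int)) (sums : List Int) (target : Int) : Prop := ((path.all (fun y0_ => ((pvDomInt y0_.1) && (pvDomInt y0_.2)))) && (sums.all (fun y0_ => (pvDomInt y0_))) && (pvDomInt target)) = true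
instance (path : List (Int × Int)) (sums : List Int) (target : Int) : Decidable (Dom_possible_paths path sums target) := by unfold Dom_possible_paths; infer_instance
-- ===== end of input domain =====

-- B replaces A's quadratic "for each element, rescan its prefix path[:k]" with one sweep of the
-- elements sorted by k that maintains a dict counting prefix-sum values seen so far (objective: faster).

-- ===== PORT A =====
def possible_paths (path : List (Int × Int)) (sums : List Int) (target : Int) : Int :=
  path.foldl (fun res kv =>
    let res := if PySem.List.pyGetD sums kv.2 0 = target then res + 1 else res
    (PySem.List.slice path none (some kv.1)).foldl
      (fun res kv1 =>
        if PySem.List.pyGetD sums kv.2 0 - PySem.List.pyGetD sums kv1.2 0 = target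
        then res + 1 else res) res) 0

-- ===== PORT B =====
-- Source B's while loop: advance pos while pos < k and pos < len(path), counting sums[path[pos][1]] into cnt
def pvAdvance (path : List (Int × Int)) (sums : List Int)
    (cnt : PySem.Dict Int Int) (pos k : Int) : PySem.Dict Int Int × Int :=
  if _h : pos < k ∧ pos < (path.length : Int) then
    let s := PySem.List.pyGetD sums (PySem.List.pyGetD path pos (0, 0)).2 0
    pvAdvance path sums (cnt.insert s (cnt.getD s 0 + 1)) (pos + 1) k
  else (cnt, pos)
termination_by (min k (path.length : Int) - pos).toNat
decreasing_by omega

def possible_paths_alt (path : List (Int × Int)) (sums : List Int) (target : Int) : Int :=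
  let st := (PySem.List.sorted path (fun kv => kv.1) false).foldl
    (fun (st : PySem.Dict Int Int × Int × Int) kv =>
      let p := pvAdvance path sums st.1 st.2.1 kv.1
      let s := PySem.List.pyGetD sums kv.2 0
      let res := if s = target then st.2.2 + 1 else st.2.2
      (p.1, p.2, res + p.1.getD (s - target) 0))
    (PySem.Dict.empty, 0, 0)
  st.2.2

-- ===== PRECONDITION & SPEC =====
-- Pre_ excludes the inputs where Python A raises IndexError (some node index v out of range of
-- sums), and inputs with a negative prefix length k — outside the function's natural domain
-- (k is a position in path), where A's slice path[:k] wraps from the end of the list.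
def Pre_possible_paths (path : List (Int × Int)) (sums : List Int) (target : Int) : Prop :=
  ∀ kv ∈ path, 0 ≤ kv.1 ∧ PySem.Raise.InRange sums.length kv.2
instance (path : List (Int × Int)) (sums : List Int) (target : Int) : Decidable (Pre_possible_paths path sums target) := by unfold Pre_possible_paths; infer_instance

def pvWitness_possible_paths : (List (Int × Int)) × List Int × Int := ([(0, 0), (1, 1)], [3, 4], 1)

def Spec_possible_paths (path : List (Int × Int)) (sums : List Int) (target : Int) (out : Int) : Prop := out = possible_paths_alt path sums target
instance (path : List (Int × Int)) (sums : List Int) (target : Int) (out : Int) : Decidable (Spec_possible_paths path sums target out) := by unfold Spec_possible_paths; infer_instance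

-- ===== CLAIM (what is proved, stated in full; the proofs are below) =====
def Claim_equal_possible_paths : Prop := ∀ (path : List (Int × Int)) (sums : List Int) (target : Int), Dom_possible_paths path sums target → Pre_possible_paths path sums target → Spec_possible_paths path sums target (possible_paths path sums target)

-- ===== LEMMAS AND PROOFS =====

-- value looked up for an element
def pvVal (sums : List Int) (kv : Int × Int) : Int := PySem.List.pyGetD sums kv.2 0

-- per-element contribution (indicator + matches in the prefix path[:k])
def pvG (path : List (Int × Int)) (sums : List Int) (target : Int) (kv : Int × Int) : Int :=
  (if pvVal sums kv = target then 1 else 0) +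
    ((path.take kv.1.toNat).countP
      (fun kv1 => pvVal sums kv1 = pvVal sums kv - target) : Int)

-- counter state after the sweep has consumed the first p elements
def pvCnt (path : List (Int × Int)) (sums : List Int) (p : Nat) : PySem.Dict Int Int :=
  ((path.map (pvVal sums)).take p).foldl (fun d s => d.insert s (d.getD s 0 + 1)) PySem.Dict.empty

theorem take_min_len {α : Type} (xs : List α) (a : Nat) :
    xs.take (min a xs.length) = xs.take a := by
  rcases Nat.le_total a xs.length with h | h
  · rw [Nat.min_eq_left h]
  · rw [Nat.min_eq_right h, List.take_length, List.take_of_length_le h]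

theorem pvAdvance_eq (path : List (Int × Int)) (sums : List Int) (p : Nat) (k : Int)
    (hpe : (p : Int) ≤ min k (path.length : Int)) :
    pvAdvance path sums (pvCnt path sums p) p k
      = (pvCnt path sums (min k (path.length : Int)).toNat, min k (path.length : Int)) := by
  set e : Int := min k (path.length : Int) with he
  rcases Nat.le.dest (show p ≤ e.toNat by omega) with ⟨d, hd⟩
  induction d generalizing p with
  | zero => rw [pvAdvance]
            simp only [show ¬((p : Int) < k ∧ (p : Int) < (path.length : Int)) by omega,
              dif_neg, not_false_iff]
            have : e = (p : Int) := by omega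
            simp [this]
  | succ d ih =>
      rw [pvAdvance]
      have hlt : (p : Int) < k ∧ (p : Int) < (path.length : Int) := by omega
      rw [dif_pos hlt]
      have hp : p < path.length := by omega
      have hkey : PySem.List.pyGetD path (p : Int) (0, 0) = path[p] :=
        PySem.List.pyGetD_ofNat path p (0, 0) hp
      have hcnt : (pvCnt path sums p).insert (pvVal sums path[p])
          ((pvCnt path sums p).getD (pvVal sums path[p]) 0 + 1) = pvCnt path sums (p + 1) := by
        unfold pvCnt
        have hm : (path.map (pvVal sums)).take (p + 1)
            = (path.map (pvVal sums)).take p ++ [pvVal sums path[p]] := by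
          rw [List.take_add_one]
          congr
          rw [List.getElem?_map, List.getElem?_eq_getElem hp]
          rfl
        rw [hm, List.foldl_append, List.foldl_cons, List.foldl_nil]
      have := ih (p + 1) (by omega) (by omega)
      simp only [hkey]
      rw [show PySem.List.pyGetD sums path[p].2 0 = pvVal sums path[p] from rfl]
      rw [hcnt]
      exact_mod_cast this

theorem pvCnt_getD (path : List (Int × Int)) (sums : List Int) (p : Nat) (v : Int) :
    (pvCnt path sums p).getD v 0 =
      ((path.take p).countP (fun kv1 => pvVal sums kv1 = v) : Int) := by
  unfold pvCnt
  rw [PySem.Dict.getD_foldl_insert_add_one]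
  rw [PySem.Dict.getD_empty, zero_add]
  norm_num [List.count_eq_countP]
  rw [← List.map_take, List.countP_map]
  apply List.countP_congr
  intro x _
  simp [Function.comp]

-- the sweep over a k-sorted list of path elements sums the per-element contributions
theorem sweep_eq (path : List (Int × Int)) (sums : List Int) (target : Int)
    (l : List (Int × Int)) (p : Nat) (res : Int)
    (hk : ∀ kv ∈ l, 0 ≤ kv.1)
    (hlo : ∀ kv ∈ l, (p : Int) ≤ min kv.1 (path.length : Int))
    (hsorted : l.Pairwise (fun a b => a.1 ≤ b.1)) :
    (l.foldl (fun (st : PySem.Dict Int Int × Int × Int) kv =>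
      let q := pvAdvance path sums st.1 st.2.1 kv.1
      let s := PySem.List.pyGetD sums kv.2 0
      let r := if s = target then st.2.2 + 1 else st.2.2
      (q.1, q.2, r + q.1.getD (s - target) 0))
      (pvCnt path sums p, (p : Int), res)).2.2
    = res + (l.map (pvG path sums target)).sum := by
  induction l generalizing p res with
  | nil => simp
  | cons kv t ih =>
      simp only [List.foldl_cons, List.map_cons, List.sum_cons]
      have hi := hlo kv (List.mem_cons_self ..)
      have hk0 := hk kv (List.mem_cons_self ..)
      have hadv := pvAdvance_eq path sums p kv.1 hi
      simp only [hadv]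
      set e : Int := min kv.1 (path.length : Int) with he
      have hcnt := pvCnt_getD path sums e.toNat (PySem.List.pyGetD sums kv.2 0 - target)
      rw [List.pairwise_cons] at hsorted
      have hstep := ih e.toNat
        ((if PySem.List.pyGetD sums kv.2 0 = target then res + 1 else res) +
          (pvCnt path sums e.toNat).getD (PySem.List.pyGetD sums kv.2 0 - target) 0)
        (fun j hj => hk j (List.mem_cons_of_mem _ hj))
        (fun j hj => by
          have h1 := hsorted.1 j hj
          have h2 := hlo j (List.mem_cons_of_mem _ hj)
          omega)
        hsorted.2
      rw [show ((e.toNat : Nat) : Int) = e by omega] at hstep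
      rw [hstep, hcnt]
      have htake : path.take e.toNat = path.take kv.1.toNat := by
        have : e.toNat = min kv.1.toNat path.length := by omega
        rw [this, take_min_len]
      rw [htake]
      unfold pvG pvVal
      by_cases h : PySem.List.pyGetD sums kv.2 0 = target
      · simp only [if_pos h]; ring
      · simp only [if_neg h]; ring

-- A is the sum of the per-element contributions (under Pre_: every k is nonnegative)
theorem portA_eq_sum (path : List (Int × Int)) (sums : List Int) (target : Int)
    (hk : ∀ kv ∈ path, 0 ≤ kv.1) :
    possible_paths path sums target = (path.map (pvG path sums target)).sum := by
  unfold possible_paths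
  rw [PySem.List.foldl_congr_mem (g := fun res kv => res + pvG path sums target kv)]
  · rw [PySem.List.foldl_add, zero_add]
  · intro acc kv hmem
    have h0 := hk kv hmem
    rw [PySem.List.slice_to path h0]
    rw [PySem.List.foldl_ite_add_one]
    unfold pvG pvVal
    have : (path.take kv.1.toNat).countP
          (fun kv1 => PySem.List.pyGetD sums kv.2 0 - PySem.List.pyGetD sums kv1.2 0 = target)
        = (path.take kv.1.toNat).countP
          (fun kv1 => PySem.List.pyGetD sums kv1.2 0 = PySem.List.pyGetD sums kv.2 0 - target) := by
      apply List.countP_congr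
      intro kv1 _
      constructor <;> intro h <;> simp_all <;> omega
    rw [this]
    by_cases h : PySem.List.pyGetD sums kv.2 0 = target
    · rw [if_pos h, if_pos h]; ring
    · rw [if_neg h, if_neg h]; ring

-- ===== VERDICT (by name: the statement is the Claim_ definition above) =====
theorem possible_paths_spec : Claim_equal_possible_paths := by
  intro path sums target _ hpre
  unfold Spec_possible_paths possible_paths_alt
  have hk : ∀ kv ∈ PySem.List.sorted path (fun kv : Int × Int => kv.1) false, 0 ≤ kv.1 := by
    intro kv hkv
    rw [PySem.List.mem_sorted] at hkv
    exact (hpre kv hkv).1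
  have hlo : ∀ kv ∈ PySem.List.sorted path (fun kv : Int × Int => kv.1) false,
      ((0 : Nat) : Int) ≤ min kv.1 (path.length : Int) := by
    intro kv hkv
    have := hk kv hkv
    simp
    omega
  have hsorted := PySem.List.sorted_pairwise (xs := path) (key := fun kv : Int × Int => kv.1)
  have hsweep := sweep_eq path sums target _ 0 0 hk hlo hsorted
  simp only [pvCnt, List.take_zero, List.foldl_nil, Nat.cast_zero] at hsweep
  rw [hsweep, zero_add,
    ((PySem.List.sorted_perm path (fun kv : Int × Int => kv.1) false).map
      (pvG path sums target)).sum_eq,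
    ← portA_eq_sum path sums target (fun kv h => (hpre kv h).1)]
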